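-- pv_equiv track=rewrite | github.com/FigueredoGaston/PythonUNSAM | Clase12/12-5.py | reubicar
-- ===== SOURCE A (Python) =====
-- def reubicar(lista, p):
--     """Reubica al elemento que está en la posición p de la lista
--        dentro del segmento [0:p-1].
--        Pre: p tiene que ser una posicion válida de lista."""
--
--     v = lista[p]
--     cont = 0
--     # Recorrer el segmento [0:p-1] de derecha a izquierda hasta
--     # encontrar la posición j tal que lista[j-1] <= v < lista[j].
--     j = p
--     while j > 0 and v < lista[j - 1]:
--         # Desplazar los elementos hacia la derecha, dejando lugar
--         # para insertar el elemento v donde corresponda.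
--         lista[j] = lista[j - 1]
--         j -= 1
--         cont += 1
--
--     lista[j] = v
--     return cont
-- ===== SOURCE B (Python) =====
-- def reubicar(lista, p):
--     """Same result as A: one LEFT-TO-RIGHT pass over the prefix counts the run
--     of trailing elements greater than v (resetting on each element <= v); that
--     run length is the shift count, and the displacement is one block move."""
--     v = lista[p]
--     cont = 0
--     for i in range(p):
--         if lista[i] > v:
--             cont += 1
--         else:
--             cont = 0
--     j = p - cont
--     lista[j + 1:p + 1] = lista[j:p]
--     lista[j] = v
--     return cont
-- ===== Notes on version B (the rewrite author's own statement) =====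
-- stated objective: alternative
-- what changed: A scans the prefix right-to-left with an early exit, shifting one element per step and counting as it writes; B scans the whole prefix LEFT-TO-RIGHT with a reset run-length accumulator (count of trailing elements greater than v), then performs the displacement as one block move - a different traversal direction, accumulator and write pattern.
import Mathlib
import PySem

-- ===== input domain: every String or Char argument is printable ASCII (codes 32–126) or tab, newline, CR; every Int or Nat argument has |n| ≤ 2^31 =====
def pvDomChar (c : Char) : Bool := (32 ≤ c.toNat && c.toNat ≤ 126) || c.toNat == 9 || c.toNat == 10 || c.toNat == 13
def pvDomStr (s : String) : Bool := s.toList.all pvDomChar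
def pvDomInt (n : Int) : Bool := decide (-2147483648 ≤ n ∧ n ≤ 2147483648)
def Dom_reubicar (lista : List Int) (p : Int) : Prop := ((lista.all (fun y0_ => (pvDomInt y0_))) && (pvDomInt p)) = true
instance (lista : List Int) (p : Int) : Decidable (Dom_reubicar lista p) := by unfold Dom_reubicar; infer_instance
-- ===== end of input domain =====

-- B replaces A's right-to-left fused search-and-shift by a left-to-right full pass with a
-- reset run-length counter plus one block move; both mutate the list the same way, and the
-- equivalence proved here is about the RETURN value only.


-- ===== PORT A =====
-- the while loop: carries the (mutated) list, j and cont; returns cont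
def reubicarLoopA (lista : List Int) (v : Int) (j cont : Int) : Int :=
  if h : 0 < j ∧ v < PySem.List.pyGetD lista (j - 1) 0 then
    reubicarLoopA (PySem.List.pySetD lista j (PySem.List.pyGetD lista (j - 1) 0)) v (j - 1) (cont + 1)
  else cont
termination_by j.toNat
decreasing_by omega

def reubicar (lista : List Int) (p : Int) : Int :=
  -- v = lista[p]; Pre_ guarantees the index is in range
  reubicarLoopA lista (PySem.List.pyGetD lista p 0) p 0

-- ===== PORT B =====
-- for i in range(p): cont = cont+1 if lista[i] > v else 0; the final block move
-- (slice assignment and lista[j] = v) mutates the list only; cont is returned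
def reubicar_alt (lista : List Int) (p : Int) : Int :=
  let v := PySem.List.pyGetD lista p 0
  (PySem.List.pyRange 0 p 1).foldl
    (fun cont i => if PySem.List.pyGetD lista i 0 > v then cont + 1 else 0) 0

-- ===== PRECONDITION & SPEC =====
-- Pre_ excludes exactly the inputs where lista[p] raises IndexError in A (and in B)
def Pre_reubicar (lista : List Int) (p : Int) : Prop := PySem.Raise.InRange lista.length p
instance (lista : List Int) (p : Int) : Decidable (Pre_reubicar lista p) := by unfold Pre_reubicar; infer_instance
def pvWitness_reubicar : List Int × Int := ([1, 3, 2], 2)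

def Spec_reubicar (lista : List Int) (p : Int) (out : Int) : Prop := out = reubicar_alt lista p
instance (lista : List Int) (p : Int) (out : Int) : Decidable (Spec_reubicar lista p out) := by unfold Spec_reubicar; infer_instance

-- ===== CLAIM (what is proved, stated in full; the proofs are below) =====
def Claim_equal_reubicar : Prop := ∀ (lista : List Int) (p : Int), Dom_reubicar lista p → Pre_reubicar lista p → Spec_reubicar lista p (reubicar lista p)

-- ===== LEMMAS AND PROOFS =====

-- proof-only helper: the read-only right-to-left stop index of A's loop
def reubicarFindJ (lista : List Int) (v : Int) (j : Int) : Int :=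
  if h : 0 < j ∧ v < PySem.List.pyGetD lista (j - 1) 0 then
    reubicarFindJ lista v (j - 1)
  else j
termination_by j.toNat
decreasing_by omega

-- pyGetD after pySetD at a different (higher) index is unchanged
theorem pyGetD_pySetD_lt (lista : List Int) (w : Int) (j i : Int) (hi : 0 ≤ i) (hij : i < j) :
    PySem.List.pyGetD (PySem.List.pySetD lista j w) i 0 = PySem.List.pyGetD lista i 0 := by
  rw [PySem.List.pySetD_of_nonneg lista w (by omega)]
  rw [show i = ((i.toNat : Nat) : Int) by omega]
  rw [PySem.List.pyGetD_natCast, PySem.List.pyGetD_natCast]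
  rw [List.getD_eq_getElem?_getD, List.getD_eq_getElem?_getD,
    List.getElem?_set_ne (by omega)]

-- writes at index j never disturb reads at indices < j, so A's loop sees the same
-- comparisons as the read-only scan: loopA over any list agreeing with lista0 below j
-- returns cont + (j - findJ lista0 v j)
theorem reubicarLoopA_eq (v : Int) : ∀ (fuel : Nat) (lista lista0 : List Int) (j cont : Int),
    j.toNat ≤ fuel →
    (∀ i : Int, 0 ≤ i → i < j → PySem.List.pyGetD lista i 0 = PySem.List.pyGetD lista0 i 0) →
    reubicarLoopA lista v j cont = cont + (j - reubicarFindJ lista0 v j) := by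
  intro fuel
  induction fuel with
  | zero =>
    intro lista lista0 j cont hf _
    have hj : j ≤ 0 := by omega
    rw [reubicarLoopA, reubicarFindJ]
    rw [dif_neg (fun h => by omega), dif_neg (fun h : 0 < j ∧ _ => by omega)]
    omega
  | succ n ih =>
    intro lista lista0 j cont hf hag
    rw [reubicarLoopA, reubicarFindJ]
    by_cases hj : 0 < j
    · have heq : PySem.List.pyGetD lista (j - 1) 0 = PySem.List.pyGetD lista0 (j - 1) 0 :=
        hag (j - 1) (by omega) (by omega)
      by_cases hv : v < PySem.List.pyGetD lista0 (j - 1) 0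
      · rw [dif_pos ⟨hj, by rw [heq]; exact hv⟩, dif_pos ⟨hj, hv⟩]
        rw [ih _ lista0 (j - 1) (cont + 1) (by omega)
          (fun i hi hij => by
            rw [pyGetD_pySetD_lt lista _ j i hi (by omega)]
            exact hag i hi (by omega))]
        omega
      · rw [dif_neg (by rw [heq]; exact fun h => hv h.2), dif_neg (fun h => hv h.2)]
        omega
    · rw [dif_neg (fun h => hj h.1), dif_neg (fun h => hj h.1)]
      omega

-- B's left-to-right reset counter over range(j) equals j - findJ lista v j for 0 ≤ j
theorem reubicarFold_eq (lista : List Int) (v : Int) : ∀ (n : Nat) (j : Int), j = (n : Int) →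
    (PySem.List.pyRange 0 j 1).foldl
      (fun cont i => if PySem.List.pyGetD lista i 0 > v then cont + 1 else 0) 0
      = j - reubicarFindJ lista v j := by
  intro n
  induction n with
  | zero =>
    intro j hj
    subst hj
    simp only [Nat.cast_zero]
    rw [PySem.List.pyRange_one_eq_nil (by omega), reubicarFindJ,
      dif_neg (fun h : (0:Int) < 0 ∧ _ => by omega)]
    rfl
  | succ m ih =>
    intro j hj
    subst hj
    have hsplit : PySem.List.pyRange 0 ((m : Int) + 1) 1
        = PySem.List.pyRange 0 (m : Int) 1 ++ [(m : Int)] :=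
      PySem.List.pyRange_one_succ_right (by omega)
    push_cast
    rw [hsplit, List.foldl_append, List.foldl_cons, List.foldl_nil]
    rw [reubicarFindJ]
    by_cases hv : v < PySem.List.pyGetD lista (m : Int) 0
    · rw [dif_pos ⟨by omega, by simpa using hv⟩]
      rw [if_pos (by simpa [gt_iff_lt] using hv)]
      rw [ih (m : Int) rfl]
      rw [show ((m : Int) + 1 - 1) = (m : Int) by omega]
      omega
    · rw [dif_neg (fun h => hv (by simpa using h.2))]
      rw [if_neg (by simpa [gt_iff_lt] using hv)]
      omega

-- ===== VERDICT (by name: the statement is the Claim_ definition above) =====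
theorem reubicar_spec : Claim_equal_reubicar := by
  intro lista p _ _
  simp only [Spec_reubicar, reubicar, reubicar_alt]
  rw [reubicarLoopA_eq _ p.toNat lista lista p 0 (le_refl _) (fun _ _ _ => rfl)]
  by_cases hp : 0 ≤ p
  · rw [reubicarFold_eq lista (PySem.List.pyGetD lista p 0) p.toNat p (by omega)]
    omega
  · rw [PySem.List.pyRange_one_eq_nil (by omega), List.foldl_nil,
      reubicarFindJ, dif_neg (fun h : 0 < p ∧ _ => by omega)]
    omega
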